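-- pv_equiv track=rewrite | github.com/meireles11/LinesOfAction | lines_of_action_AI_vs_Ai.py | valid_moves
-- ===== SOURCE A (Python) =====
-- def valid_moves(board, player):
--   n = len(board)
--   directions = [(1,0),(0,1),(1,1),(1,-1)]
--   moves = []
--
--   for y in range(n):
--     for x in range(n):
--       if (board[y][x] == player):
--         for dx,dy in directions:
--           count = 0
--
--           # Count pieces in the positive direction
--
--           tx,ty = x,y
--           while 0<=tx<n and 0<=ty<n:
--             if (board[ty][tx] != '.'):
--               count += 1
--             tx += dx
--             ty += dy
--
--           # Count pieces in the negative direction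
--
--           tx,ty = x-dx,y-dy
--           while 0<=tx<n and 0<=ty<n:
--             if (board[ty][tx] != '.'):
--               count += 1
--             tx -= dx
--             ty -= dy
--
--           #Check both directions
--
--           for k in range(2):
--             tx,ty = x,y
--             blocked = False
--             for i in range(count):
--               tx += dx*(-1)**k
--               ty += dy*(-1)**k
--
--               # If it moves out of bounds, the move is blocked
--               if (tx<0 or tx>n-1 or ty<0 or ty>n-1):
--                 blocked = True
--                 break
--
--               # If an opponent's piece is encountered before the last step, the move is blocked
--               if (board[ty][tx] != '.' and board[ty][tx] != player and i != count-1):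
--                 blocked = True
--                 break
--
--               # If a player's own piece is at the final destination, the move is blocked
--               if (board[ty][tx] == player and i == count-1):
--                 blocked = True
--                 break
--             if (blocked == False):
--               moves += [(x,y,tx,ty)]
--
--   return moves
-- ===== SOURCE B (Python) =====
-- def valid_moves(board, player):
--   n = len(board)
--   # One pass over the board collects every occupied cell; four counter tables
--   # give each line's piece total by key (row y, column x, diagonal x-y, anti-diagonal x+y),
--   # replacing the per-piece two-way counting scans.
--   pieces = [(x, y) for y in range(n) for x in range(n) if board[y][x] != '.']
--   rows = {}
--   for (x, y) in pieces:
--     rows[y] = rows.get(y, 0) + 1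
--   cols = {}
--   for (x, y) in pieces:
--     cols[x] = cols.get(x, 0) + 1
--   diag = {}
--   for (x, y) in pieces:
--     diag[x - y] = diag.get(x - y, 0) + 1
--   anti = {}
--   for (x, y) in pieces:
--     anti[x + y] = anti.get(x + y, 0) + 1
--
--   moves = []
--   for y in range(n):
--     for x in range(n):
--       if board[y][x] == player:
--         for dx, dy, count in ((1, 0, rows.get(y, 0)),
--                               (0, 1, cols.get(x, 0)),
--                               (1, 1, diag.get(x - y, 0)),
--                               (1, -1, anti.get(x + y, 0))):
--           # validation walk, unchanged from the original
--           for sx, sy in ((dx, dy), (-dx, -dy)):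
--             tx, ty = x, y
--             blocked = False
--             for i in range(count):
--               tx += sx
--               ty += sy
--               if (tx < 0 or tx > n - 1 or ty < 0 or ty > n - 1):
--                 blocked = True
--                 break
--               if (board[ty][tx] != '.' and board[ty][tx] != player and i != count - 1):
--                 blocked = True
--                 break
--               if (board[ty][tx] == player and i == count - 1):
--                 blocked = True
--                 break
--             if (blocked == False):
--               moves += [(x, y, tx, ty)]
--   return moves
-- ===== Notes on version B (the rewrite author's own statement) =====
-- stated objective: alternative
-- what changed: B replaces A's per-piece two-directional while-loop line scans by four counter tables (row y, column x, diagonal x-y, anti-diagonal x+y) built in one pass over the board, then looks each piece's line count up by key; the validation walk and move order are unchanged.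
-- outside the precondition, e.g. on valid_moves([['.', 'B'], ['B']], 'B'): A raises IndexError, B raises IndexError
import Mathlib
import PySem

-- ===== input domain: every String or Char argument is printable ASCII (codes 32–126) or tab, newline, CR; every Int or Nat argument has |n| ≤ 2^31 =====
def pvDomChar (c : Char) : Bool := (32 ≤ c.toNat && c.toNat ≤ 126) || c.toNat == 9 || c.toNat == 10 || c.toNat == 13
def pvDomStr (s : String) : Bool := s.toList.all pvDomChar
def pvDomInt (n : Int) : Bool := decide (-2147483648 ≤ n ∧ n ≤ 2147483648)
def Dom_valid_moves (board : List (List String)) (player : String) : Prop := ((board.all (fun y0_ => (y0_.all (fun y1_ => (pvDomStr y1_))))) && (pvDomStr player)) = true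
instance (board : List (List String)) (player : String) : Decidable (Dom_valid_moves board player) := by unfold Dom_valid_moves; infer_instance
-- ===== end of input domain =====

-- B replaces A's per-piece two-way line-counting scans by four counter tables
-- (row / column / diagonal / anti-diagonal) built in one pass over the board;
-- the validation walk and move order are unchanged.

-- ===== PORT A =====

-- board[ty][tx] (used by both ports; in range whenever evaluated, under Pre_)
def pvCell (board : List (List String)) (ty tx : Int) : String :=
  (PySem.List.pyGet? ((PySem.List.pyGet? board ty).getD []) tx).getD ""

-- `while 0<=tx<n and 0<=ty<n: … tx += dx; ty += dy` counting loop; fuel n+1 is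
-- enough since one coordinate moves by ±1 each step and the loop stops outside [0,n)
def scanPosA (board : List (List String)) (n dx dy : Int) : Nat → Int → Int → Int → Int
  | 0, _, _, count => count
  | fuel + 1, tx, ty, count =>
      if 0 ≤ tx ∧ tx < n ∧ 0 ≤ ty ∧ ty < n then
        scanPosA board n dx dy fuel (tx + dx) (ty + dy)
          (if pvCell board ty tx ≠ "." then count + 1 else count)
      else count

-- the second counting loop: `tx -= dx; ty -= dy`
def scanNegA (board : List (List String)) (n dx dy : Int) : Nat → Int → Int → Int → Int
  | 0, _, _, count => count
  | fuel + 1, tx, ty, count =>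
      if 0 ≤ tx ∧ tx < n ∧ 0 ≤ ty ∧ ty < n then
        scanNegA board n dx dy fuel (tx - dx) (ty - dy)
          (if pvCell board ty tx ≠ "." then count + 1 else count)
      else count

-- `for i in range(count): …` validation walk with its three `break`s; identical
-- in both Pythons, so shared by both ports (step (sx, sy); A passes dx*(-1)**k)
def pvWalk (board : List (List String)) (n : Int) (player : String) (sx sy count : Int) :
    List Int → Int → Int → Int × Int × Bool
  | [], tx, ty => (tx, ty, false)
  | i :: rest, tx, ty =>
      let tx' := tx + sx
      let ty' := ty + sy
      if tx' < 0 ∨ tx' > n - 1 ∨ ty' < 0 ∨ ty' > n - 1 then (tx', ty', true)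
      else if pvCell board ty' tx' ≠ "." ∧ pvCell board ty' tx' ≠ player ∧ i ≠ count - 1 then
        (tx', ty', true)
      else if pvCell board ty' tx' = player ∧ i = count - 1 then (tx', ty', true)
      else pvWalk board n player sx sy count rest tx' ty'

def valid_moves (board : List (List String)) (player : String) : List (Int × Int × Int × Int) :=
  let n : Int := board.length
  let directions : List (Int × Int) := [(1, 0), (0, 1), (1, 1), (1, -1)]
  (PySem.List.pyRange 0 n 1).foldl (fun moves y =>
    (PySem.List.pyRange 0 n 1).foldl (fun moves x =>
      if pvCell board y x = player then
        directions.foldl (fun moves d =>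
          let dx := d.1
          let dy := d.2
          let count := scanPosA board n dx dy (n.toNat + 1) x y 0
          let count := scanNegA board n dx dy (n.toNat + 1) (x - dx) (y - dy) count
          (PySem.List.pyRange 0 2 1).foldl (fun moves k =>
            let sx := dx * (-1 : Int) ^ k.toNat
            let sy := dy * (-1 : Int) ^ k.toNat
            let r := pvWalk board n player sx sy count (PySem.List.pyRange 0 count 1) x y
            if r.2.2 = false then moves ++ [(x, y, r.1, r.2.1)] else moves) moves) moves
      else moves) moves) []

-- ===== PORT B =====

-- `pieces = [(x, y) for y in range(n) for x in range(n) if board[y][x] != '.']`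
def pvPieces (board : List (List String)) (n : Int) : List (Int × Int) :=
  (PySem.List.pyRange 0 n 1).flatMap (fun y =>
    ((PySem.List.pyRange 0 n 1).filter (fun x => pvCell board y x != ".")).map (fun x => (x, y)))

-- `t = {}; for (x, y) in pieces: t[key] = t.get(key, 0) + 1` (key = the line id)
def pvTable (pieces : List (Int × Int)) (key : Int × Int → Int) : PySem.Dict Int Int :=
  pieces.foldl (fun d c => d.insert (key c) (d.getD (key c) 0 + 1)) PySem.Dict.empty

def valid_moves_alt (board : List (List String)) (player : String) : List (Int × Int × Int × Int) :=
  let n : Int := board.length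
  let pieces := pvPieces board n
  let rows := pvTable pieces (fun c => c.2)
  let cols := pvTable pieces (fun c => c.1)
  let diag := pvTable pieces (fun c => c.1 - c.2)
  let anti := pvTable pieces (fun c => c.1 + c.2)
  (PySem.List.pyRange 0 n 1).foldl (fun moves y =>
    (PySem.List.pyRange 0 n 1).foldl (fun moves x =>
      if pvCell board y x = player then
        [((1 : Int), (0 : Int), rows.getD y 0), (0, 1, cols.getD x 0),
         (1, 1, diag.getD (x - y) 0), (1, -1, anti.getD (x + y) 0)].foldl (fun moves t =>
          let dx := t.1
          let dy := t.2.1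
          let count := t.2.2
          [(dx, dy), (-dx, -dy)].foldl (fun moves s =>
            let r := pvWalk board n player s.1 s.2 count (PySem.List.pyRange 0 count 1) x y
            if r.2.2 = false then moves ++ [(x, y, r.1, r.2.1)] else moves) moves) moves
      else moves) moves) []

-- ===== PRECONDITION & SPEC =====

-- Pre_ excludes ragged boards with a row shorter than len(board), on which A's
-- board[y][x] raises IndexError (B raises there too).
def Pre_valid_moves (board : List (List String)) (player : String) : Prop :=
  ∀ row ∈ board, board.length ≤ row.length
instance (board : List (List String)) (player : String) : Decidable (Pre_valid_moves board player) := by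
  unfold Pre_valid_moves; infer_instance

def pvWitness_valid_moves : List (List String) × String :=
  ([[".", "B", "."], ["W", ".", "B"], [".", "B", "."]], "B")

def Spec_valid_moves (board : List (List String)) (player : String) (out : List (Int × Int × Int × Int)) : Prop := out = valid_moves_alt board player
instance (board : List (List String)) (player : String) (out : List (Int × Int × Int × Int)) : Decidable (Spec_valid_moves board player out) := by unfold Spec_valid_moves; infer_instance

-- ===== CLAIM (what is proved, stated in full; the proofs are below) =====
def Claim_equal_valid_moves : Prop := ∀ (board : List (List String)) (player : String), Dom_valid_moves board player → Pre_valid_moves board player → Spec_valid_moves board player (valid_moves board player)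

-- ===== LEMMAS AND PROOFS =====


-- proof-side helpers and lemmas

-- 0/1 indicator: in-bounds and occupied
def pvInd (board : List (List String)) (n a b : Int) : Int :=
  if (0 ≤ a ∧ a < n ∧ 0 ≤ b ∧ b < n) ∧ pvCell board b a ≠ "." then 1 else 0

-- the index set visited by the two scans: 0,1,…,F-1 and -1,-2,…,-F
def pvBigL (F : Nat) : List Int :=
  List.map (fun (j : Nat) => (j : Int)) (List.range F) ++ List.map (fun (j : Nat) => -((j : Int) + 1)) (List.range F)

lemma mem_pvBigL {F : Nat} {t : Int} : t ∈ pvBigL F ↔ -(F : Int) ≤ t ∧ t < F := by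
  simp only [pvBigL, List.mem_append, List.mem_map, List.mem_range]
  constructor
  · rintro (⟨j, hj, rfl⟩ | ⟨j, hj, rfl⟩) <;> omega
  · rintro ⟨h1, h2⟩
    by_cases ht : 0 ≤ t
    · exact Or.inl ⟨t.toNat, by omega, by omega⟩
    · exact Or.inr ⟨(-t - 1).toNat, by omega, by omega⟩

lemma nodup_pvBigL (F : Nat) : (pvBigL F).Nodup := by
  have h1 : (List.map (fun (j : Nat) => (j : Int)) (List.range F)).Nodup :=
    List.Nodup.map (fun a b h => by exact_mod_cast h) List.nodup_range
  have h2 : (List.map (fun (j : Nat) => -((j : Int) + 1)) (List.range F)).Nodup :=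
    List.Nodup.map (fun a b h => by omega) List.nodup_range
  refine List.Nodup.append h1 h2 ?_
  intro t ht1 ht2
  simp only [List.mem_map, List.mem_range] at ht1 ht2
  obtain ⟨j, _, rfl⟩ := ht1
  obtain ⟨i, _, hij⟩ := ht2
  omega

lemma scanNeg_eq (board : List (List String)) (n dx dy : Int) :
    ∀ (f : Nat) (tx ty c : Int),
      scanNegA board n dx dy f tx ty c = scanPosA board n (-dx) (-dy) f tx ty c := by
  intro f
  induction f with
  | zero => intro tx ty c; rfl
  | succ f ih =>
      intro tx ty c
      simp only [scanNegA, scanPosA, sub_eq_add_neg]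
      split_ifs <;> simp [ih]

lemma scanPos_eq_sum (board : List (List String)) {n dx dy : Int}
    (hdx : dx = -1 ∨ dx = 0 ∨ dx = 1) (hdy : dy = -1 ∨ dy = 0 ∨ dy = 1) (_hn : 0 ≤ n) :
    ∀ (f : Nat) (tx ty c : Int),
      ((0 ≤ tx ∨ dx ≤ 0) ∧ (tx < n ∨ 0 ≤ dx)) → ((0 ≤ ty ∨ dy ≤ 0) ∧ (ty < n ∨ 0 ≤ dy)) →
      scanPosA board n dx dy f tx ty c
        = c + (List.map (fun (j : Nat) => pvInd board n (tx + (j : Int) * dx) (ty + (j : Int) * dy))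
            (List.range f)).sum := by
  intro f
  induction f with
  | zero => intro tx ty c _ _; simp [scanPosA]
  | succ f ih =>
      intro tx ty c hokx hoky
      by_cases hin : 0 ≤ tx ∧ tx < n ∧ 0 ≤ ty ∧ ty < n
      · rw [scanPosA, if_pos hin,
          ih (tx + dx) (ty + dy) _ (by rcases hdx with h|h|h <;> subst h <;> omega)
            (by rcases hdy with h|h|h <;> subst h <;> omega)]
        rw [List.range_succ_eq_map]
        simp only [List.map_cons, List.map_map, List.sum_cons, Function.comp_def]
        have hmap : List.map (fun (j : Nat) =>
              pvInd board n (tx + (↑(j + 1) : Int) * dx) (ty + (↑(j + 1) : Int) * dy)) (List.range f)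
            = List.map (fun (j : Nat) =>
              pvInd board n (tx + dx + (j : Int) * dx) (ty + dy + (j : Int) * dy)) (List.range f) := by
          refine List.map_congr_left fun j _ => ?_
          have e1 : tx + (↑(j + 1) : Int) * dx = tx + dx + (j : Int) * dx := by push_cast; ring
          have e2 : ty + (↑(j + 1) : Int) * dy = ty + dy + (j : Int) * dy := by push_cast; ring
          rw [e1, e2]
        have h0 : pvInd board n (tx + ((0 : Nat) : Int) * dx) (ty + ((0 : Nat) : Int) * dy)
            = if pvCell board ty tx ≠ "." then 1 else 0 := by
          simp only [pvInd, Nat.cast_zero, zero_mul, add_zero]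
          rw [if_congr (and_iff_right hin) rfl rfl]
        simp only [Nat.succ_eq_add_one] at hmap ⊢
        rw [hmap, h0]
        split_ifs <;> ring
      · rw [scanPosA, if_neg hin]
        have hsum : (List.map (fun (j : Nat) =>
            pvInd board n (tx + (j : Int) * dx) (ty + (j : Int) * dy)) (List.range (f + 1))).sum
            = 0 := by
          apply List.sum_eq_zero
          intro a ha
          simp only [List.mem_map] at ha
          obtain ⟨j, _, rfl⟩ := ha
          simp only [pvInd, ite_eq_right_iff]
          intro hc
          exfalso
          rcases hc with ⟨⟨ha1, ha2, hb1, hb2⟩, _⟩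
          have hj : 0 ≤ (j : Int) := Int.natCast_nonneg j
          have hxj : (j : Int) * dx ≤ 0 ∨ 0 ≤ (j : Int) * dx := by
            rcases hdx with h|h|h <;> subst h <;> [left; left; right] <;> nlinarith
          have hyj : (j : Int) * dy ≤ 0 ∨ 0 ≤ (j : Int) * dy := by
            rcases hdy with h|h|h <;> subst h <;> [left; left; right] <;> nlinarith
          rcases hdx with h|h|h <;> subst h <;> rcases hdy with h|h|h <;> subst h <;>
            simp only [mul_neg_one, mul_zero, mul_one] at ha1 ha2 hb1 hb2 <;> omega
        rw [hsum]; ring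

-- the two scans together sum pvInd over the index window pvBigL
lemma scan_total_eq (board : List (List String)) {n dx dy x y : Int}
    (hdx : dx = -1 ∨ dx = 0 ∨ dx = 1) (hdy : dy = -1 ∨ dy = 0 ∨ dy = 1) (hn : 0 ≤ n)
    (hx : 0 ≤ x ∧ x < n) (hy : 0 ≤ y ∧ y < n) :
    scanNegA board n dx dy (n.toNat + 1) (x - dx) (y - dy)
        (scanPosA board n dx dy (n.toNat + 1) x y 0)
      = ((pvBigL (n.toNat + 1)).map (fun t => pvInd board n (x + t * dx) (y + t * dy))).sum := by
  rw [scanNeg_eq]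
  rw [scanPos_eq_sum board (by omega) (by omega) hn (n.toNat + 1) (x - dx) (y - dy) _
    (by rcases hdx with h|h|h <;> subst h <;> omega)
    (by rcases hdy with h|h|h <;> subst h <;> omega)]
  rw [scanPos_eq_sum board hdx hdy hn (n.toNat + 1) x y 0
    ⟨Or.inl hx.1, Or.inl hx.2⟩ ⟨Or.inl hy.1, Or.inl hy.2⟩]
  simp only [pvBigL, List.map_append, List.sum_append, List.map_map, Function.comp_def, zero_add]
  have hneg : List.map (fun (j : Nat) => pvInd board n (x + -((j : Int) + 1) * dx) (y + -((j : Int) + 1) * dy))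
        (List.range (n.toNat + 1))
      = List.map (fun (j : Nat) => pvInd board n (x - dx + (j : Int) * -dx) (y - dy + (j : Int) * -dy))
        (List.range (n.toNat + 1)) := by
    refine List.map_congr_left fun j _ => ?_
    have e1 : x + -((j : Int) + 1) * dx = x - dx + (j : Int) * -dx := by ring
    have e2 : y + -((j : Int) + 1) * dy = y - dy + (j : Int) * -dy := by ring
    rw [e1, e2]
  rw [hneg]

-- sums over a nodup index list with an in-window guard reindex to sums over range(n)
lemma pv_sum_window (L : List Int) (hnd : L.Nodup) (n x σ : Int) (hσ : σ = 1 ∨ σ = -1)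
    (g : Int → Int)
    (hcov : ∀ u : Int, 0 ≤ u → u < n → g u ≠ 0 → σ * (u - x) ∈ L) :
    (L.map (fun t => if 0 ≤ x + σ * t ∧ x + σ * t < n then g (x + σ * t) else 0)).sum
      = ((PySem.List.pyRange 0 n 1).map g).sum := by
  have hσσ : ∀ t : Int, x + σ * (σ * (t - x)) = t := by
    intro t; rcases hσ with h|h <;> subst h <;> ring
  rw [← List.sum_toFinset _ hnd, ← List.sum_toFinset _ (PySem.List.nodup_pyRange_one 0 n)]
  refine Finset.sum_bij_ne_zero (fun t _ _ => x + σ * t) ?_ ?_ ?_ ?_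
  · intro t ht hF
    by_cases hg : 0 ≤ x + σ * t ∧ x + σ * t < n
    · rw [List.mem_toFinset]
      exact PySem.List.mem_pyRange_one.mpr ⟨hg.1, hg.2⟩
    · exact absurd (if_neg hg) hF
  · intro a1 h11 h12 a2 h21 h22 he
    rcases hσ with h|h <;> subst h <;> ring_nf at he <;> omega
  · intro b hb hgb
    rw [List.mem_toFinset] at hb
    obtain ⟨hb1, hb2⟩ := PySem.List.mem_pyRange_one.mp hb
    have hxa : x + σ * (σ * (b - x)) = b := hσσ b
    have hFa : (if 0 ≤ x + σ * (σ * (b - x)) ∧ x + σ * (σ * (b - x)) < n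
        then g (x + σ * (σ * (b - x))) else 0) ≠ 0 := by
      rw [hxa, if_pos ⟨hb1, hb2⟩]
      exact hgb
    exact ⟨σ * (b - x), by rw [List.mem_toFinset]; exact hcov b hb1 hb2 hgb, hFa, hxa⟩
  · intro t ht hF
    by_cases hg : 0 ≤ x + σ * t ∧ x + σ * t < n
    · rw [if_pos hg]
    · exact absurd (if_neg hg) hF

lemma sum_map_filter {α : Type} (l : List α) (q : α → Bool) (F : α → Int) :
    ((l.filter q).map F).sum = (l.map (fun a => if q a then F a else 0)).sum := by
  induction l with
  | nil => rfl
  | cons a l ih =>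
      rw [List.filter_cons]
      by_cases h : q a <;> simp [h, ih]

lemma sum_pick (l : List Int) (hnd : l.Nodup) {c : Int} (hc : c ∈ l) (F : Int → Int)
    (hz : ∀ t ∈ l, t ≠ c → F t = 0) : (l.map F).sum = F c := by
  induction l with
  | nil => cases hc
  | cons a l ih =>
      rcases List.mem_cons.mp hc with rfl | hc'
      · simp only [List.map_cons, List.sum_cons]
        have hzl : (List.map F l).sum = 0 := by
          apply List.sum_eq_zero
          intro b hb
          simp only [List.mem_map] at hb
          obtain ⟨t, ht, rfl⟩ := hb
          refine hz t (List.mem_cons_of_mem _ ht) ?_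
          rintro rfl
          exact (List.nodup_cons.mp hnd).1 ht
        rw [hzl, add_zero]
      · have ha : F a = 0 := by
          refine hz a (List.mem_cons_self) ?_
          rintro rfl
          exact (List.nodup_cons.mp hnd).1 hc'
        simp only [List.map_cons, List.sum_cons, ha, zero_add]
        exact ih (List.nodup_cons.mp hnd).2 hc' (fun t ht h => hz t (List.mem_cons_of_mem _ ht) h)

lemma sum_map_flatMap {α β : Type} (l : List α) (f : α → List β) (F : β → Int) :
    ((l.flatMap f).map F).sum = (l.map (fun a => ((f a).map F).sum)).sum := by
  rw [List.map_flatMap]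
  induction l with
  | nil => rfl
  | cons a l ih => simp [List.flatMap_cons, ih]

-- the table built from pieces is the double sum of occupied cells with matching key
lemma table_getD (board : List (List String)) (n : Int) (key : Int × Int → Int) (k : Int) :
    (pvTable (pvPieces board n) key).getD k 0
      = ((PySem.List.pyRange 0 n 1).map (fun y' =>
          ((PySem.List.pyRange 0 n 1).map (fun x' =>
            if pvCell board y' x' ≠ "." ∧ key (x', y') = k then (1 : Int) else 0)).sum)).sum := by
  have h1 : ∀ (l : List (Int × Int)) (d : PySem.Dict Int Int),
      l.foldl (fun d c => d.insert (key c) (d.getD (key c) 0 + 1)) d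
        = (l.map key).foldl (fun d x => d.insert x (d.getD x 0 + 1)) d := by
    intro l
    induction l with
    | nil => intro d; rfl
    | cons a l ih => intro d; simp only [List.foldl_cons, List.map_cons]; exact ih _
  rw [pvTable, h1, PySem.Dict.getD_foldl_insert_add_one, PySem.Dict.getD_empty, zero_add,
    List.count_eq_countP, List.countP_map, ← PySem.List.sum_map_ite_one_zero]
  rw [pvPieces, sum_map_flatMap]
  refine congrArg List.sum (List.map_congr_left fun y' _ => ?_)
  rw [List.map_map, sum_map_filter]
  refine congrArg List.sum (List.map_congr_left fun x' _ => ?_)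
  by_cases hq : pvCell board y' x' = "." <;> by_cases hk : key (x', y') = k <;>
    simp [hq, hk, Function.comp]

lemma count_row (board : List (List String)) {n x y : Int} (hn : 0 ≤ n)
    (hx : 0 ≤ x ∧ x < n) (hy : 0 ≤ y ∧ y < n) :
    scanNegA board n 1 0 (n.toNat + 1) (x - 1) (y - 0)
        (scanPosA board n 1 0 (n.toNat + 1) x y 0)
      = (pvTable (pvPieces board n) (fun c => c.2)).getD y 0 := by
  rw [scan_total_eq board (by omega) (by omega) hn hx hy, table_getD]
  have hcov : ∀ u : Int, 0 ≤ u → u < n →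
      (if pvCell board y u ≠ "." then (1 : Int) else 0) ≠ 0 → 1 * (u - x) ∈ pvBigL (n.toNat + 1) := by
    intro u hu1 hu2 _
    rw [one_mul, mem_pvBigL]
    omega
  have hw := pv_sum_window (pvBigL (n.toNat + 1)) (nodup_pvBigL _) n x 1 (Or.inl rfl)
    (fun u => if pvCell board y u ≠ "." then (1 : Int) else 0) hcov
  simp only [one_mul] at hw
  have hmap : (pvBigL (n.toNat + 1)).map (fun t => pvInd board n (x + t * 1) (y + t * 0))
      = (pvBigL (n.toNat + 1)).map (fun t =>
          if 0 ≤ x + t ∧ x + t < n then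
            (if pvCell board y (x + t) ≠ "." then (1 : Int) else 0) else 0) := by
    refine List.map_congr_left fun t _ => ?_
    simp only [pvInd, mul_zero, add_zero, mul_one]
    split_ifs <;> first | rfl | omega | tauto
  rw [hmap, hw]
  symm
  rw [sum_pick (PySem.List.pyRange 0 n 1) (PySem.List.nodup_pyRange_one 0 n)
    (PySem.List.mem_pyRange_one.mpr ⟨hy.1, hy.2⟩) _ ?hz]
  case hz =>
    intro y' _ hne
    apply List.sum_eq_zero
    intro a ha
    simp only [List.mem_map] at ha
    obtain ⟨x', _, rfl⟩ := ha
    exact if_neg (by tauto)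
  refine congrArg List.sum (List.map_congr_left fun x' _ => ?_)
  split_ifs <;> first | rfl | tauto

lemma count_col (board : List (List String)) {n x y : Int} (hn : 0 ≤ n)
    (hx : 0 ≤ x ∧ x < n) (hy : 0 ≤ y ∧ y < n) :
    scanNegA board n 0 1 (n.toNat + 1) (x - 0) (y - 1)
        (scanPosA board n 0 1 (n.toNat + 1) x y 0)
      = (pvTable (pvPieces board n) (fun c => c.1)).getD x 0 := by
  rw [scan_total_eq board (by omega) (by omega) hn hx hy, table_getD]
  have hcov : ∀ u : Int, 0 ≤ u → u < n →
      (if pvCell board u x ≠ "." then (1 : Int) else 0) ≠ 0 → 1 * (u - y) ∈ pvBigL (n.toNat + 1) := by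
    intro u hu1 hu2 _
    rw [one_mul, mem_pvBigL]
    omega
  have hw := pv_sum_window (pvBigL (n.toNat + 1)) (nodup_pvBigL _) n y 1 (Or.inl rfl)
    (fun u => if pvCell board u x ≠ "." then (1 : Int) else 0) hcov
  simp only [one_mul] at hw
  have hmap : (pvBigL (n.toNat + 1)).map (fun t => pvInd board n (x + t * 0) (y + t * 1))
      = (pvBigL (n.toNat + 1)).map (fun t =>
          if 0 ≤ y + t ∧ y + t < n then
            (if pvCell board (y + t) x ≠ "." then (1 : Int) else 0) else 0) := by
    refine List.map_congr_left fun t _ => ?_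
    simp only [pvInd, mul_zero, add_zero, mul_one]
    split_ifs <;> first | rfl | omega | tauto
  rw [hmap, hw]
  refine congrArg List.sum (List.map_congr_left fun y' _ => ?_)
  symm
  rw [sum_pick (PySem.List.pyRange 0 n 1) (PySem.List.nodup_pyRange_one 0 n)
    (PySem.List.mem_pyRange_one.mpr ⟨hx.1, hx.2⟩) _ ?hz]
  case hz =>
    intro x' _ hne
    exact if_neg (fun hc => hne hc.2)
  split_ifs <;> first | rfl | tauto

lemma count_diag (board : List (List String)) {n x y : Int} (hn : 0 ≤ n)
    (hx : 0 ≤ x ∧ x < n) (hy : 0 ≤ y ∧ y < n) :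
    scanNegA board n 1 1 (n.toNat + 1) (x - 1) (y - 1)
        (scanPosA board n 1 1 (n.toNat + 1) x y 0)
      = (pvTable (pvPieces board n) (fun c => c.1 - c.2)).getD (x - y) 0 := by
  rw [scan_total_eq board (by omega) (by omega) hn hx hy, table_getD]
  have hcov : ∀ u : Int, 0 ≤ u → u < n →
      (if (0 ≤ u + (x - y) ∧ u + (x - y) < n) ∧ pvCell board u (u + (x - y)) ≠ "." then (1 : Int) else 0) ≠ 0 →
      1 * (u - y) ∈ pvBigL (n.toNat + 1) := by
    intro u hu1 hu2 _
    rw [one_mul, mem_pvBigL]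
    omega
  have hw := pv_sum_window (pvBigL (n.toNat + 1)) (nodup_pvBigL _) n y 1 (Or.inl rfl)
    (fun u => if (0 ≤ u + (x - y) ∧ u + (x - y) < n) ∧ pvCell board u (u + (x - y)) ≠ "." then (1 : Int) else 0)
    hcov
  simp only [one_mul] at hw
  have hmap : (pvBigL (n.toNat + 1)).map (fun t => pvInd board n (x + t * 1) (y + t * 1))
      = (pvBigL (n.toNat + 1)).map (fun t =>
          if 0 ≤ y + t ∧ y + t < n then
            (if (0 ≤ y + t + (x - y) ∧ y + t + (x - y) < n) ∧
                pvCell board (y + t) (y + t + (x - y)) ≠ "." then (1 : Int) else 0) else 0) := by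
    refine List.map_congr_left fun t _ => ?_
    have e : y + t + (x - y) = x + t := by ring
    rw [e]
    simp only [pvInd, mul_one]
    split_ifs <;> first | rfl | omega | tauto
  rw [hmap, hw]
  refine congrArg List.sum (List.map_congr_left fun y' hy' => ?_)
  obtain ⟨hy'1, hy'2⟩ := PySem.List.mem_pyRange_one.mp hy'
  symm
  by_cases hb : 0 ≤ y' + (x - y) ∧ y' + (x - y) < n
  · rw [sum_pick (PySem.List.pyRange 0 n 1) (PySem.List.nodup_pyRange_one 0 n)
      (PySem.List.mem_pyRange_one.mpr ⟨hb.1, hb.2⟩) _ ?hz]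
    case hz =>
      intro x' _ hne
      refine if_neg (fun hc => hne ?_)
      have h2 := hc.2
      try dsimp only at h2
      omega
    have harith : y' + (x - y) - y' = x - y := by omega
    simp only [harith, hb.1, hb.2, and_true, true_and]
  · rw [List.sum_eq_zero ?hz0, if_neg (fun hc => hb hc.1)]
    case hz0 =>
      intro a ha
      simp only [List.mem_map] at ha
      obtain ⟨x', hx', rfl⟩ := ha
      obtain ⟨hx'1, hx'2⟩ := PySem.List.mem_pyRange_one.mp hx'
      refine if_neg (fun hc => ?_)
      have h2 := hc.2
      try dsimp only at h2
      omega

lemma count_anti (board : List (List String)) {n x y : Int} (hn : 0 ≤ n)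
    (hx : 0 ≤ x ∧ x < n) (hy : 0 ≤ y ∧ y < n) :
    scanNegA board n 1 (-1) (n.toNat + 1) (x - 1) (y - -1)
        (scanPosA board n 1 (-1) (n.toNat + 1) x y 0)
      = (pvTable (pvPieces board n) (fun c => c.1 + c.2)).getD (x + y) 0 := by
  rw [scan_total_eq board (by omega) (by omega) hn hx hy, table_getD]
  have hcov : ∀ u : Int, 0 ≤ u → u < n →
      (if (0 ≤ x + y - u ∧ x + y - u < n) ∧ pvCell board (x + y - u) u ≠ "." then (1 : Int) else 0) ≠ 0 →
      1 * (u - x) ∈ pvBigL (n.toNat + 1) := by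
    intro u hu1 hu2 _
    rw [one_mul, mem_pvBigL]
    omega
  have hw := pv_sum_window (pvBigL (n.toNat + 1)) (nodup_pvBigL _) n x 1 (Or.inl rfl)
    (fun u => if (0 ≤ x + y - u ∧ x + y - u < n) ∧ pvCell board (x + y - u) u ≠ "." then (1 : Int) else 0)
    hcov
  simp only [one_mul] at hw
  have hmap : (pvBigL (n.toNat + 1)).map (fun t => pvInd board n (x + t * 1) (y + t * -1))
      = (pvBigL (n.toNat + 1)).map (fun t =>
          if 0 ≤ x + t ∧ x + t < n then
            (if (0 ≤ x + y - (x + t) ∧ x + y - (x + t) < n) ∧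
                pvCell board (x + y - (x + t)) (x + t) ≠ "." then (1 : Int) else 0) else 0) := by
    refine List.map_congr_left fun t _ => ?_
    have e : x + y - (x + t) = y + t * -1 := by ring
    rw [e]
    simp only [pvInd, mul_one]
    split_ifs <;> first | rfl | omega | tauto
  -- reflection: the table sum is the same sum read with u ↦ x + y - u
  have hcov2 : ∀ u : Int, 0 ≤ u → u < n →
      (if (0 ≤ x + y - u ∧ x + y - u < n) ∧ pvCell board (x + y - u) u ≠ "." then (1 : Int) else 0) ≠ 0 →
      -1 * (u - (x + y)) ∈ PySem.List.pyRange 0 n 1 := by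
    intro u hu1 hu2 hne
    by_cases hc : (0 ≤ x + y - u ∧ x + y - u < n) ∧ pvCell board (x + y - u) u ≠ "."
    · rw [PySem.List.mem_pyRange_one]
      obtain ⟨⟨h1, h2⟩, _⟩ := hc
      constructor <;> omega
    · exact absurd (if_neg hc) hne
  have hw2 := pv_sum_window (PySem.List.pyRange 0 n 1) (PySem.List.nodup_pyRange_one 0 n)
    n (x + y) (-1) (Or.inr rfl)
    (fun u => if (0 ≤ x + y - u ∧ x + y - u < n) ∧ pvCell board (x + y - u) u ≠ "." then (1 : Int) else 0)
    hcov2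
  have e1 : ∀ t : Int, x + y + -1 * t = x + y - t := fun t => by ring
  have e2 : ∀ t : Int, x + y - (x + y - t) = t := fun t => by ring
  simp only [e1, e2] at hw2
  rw [hmap, hw, ← hw2]
  refine congrArg List.sum (List.map_congr_left fun t ht => ?_)
  obtain ⟨ht1, ht2⟩ := PySem.List.mem_pyRange_one.mp ht
  symm
  by_cases hb : 0 ≤ x + y - t ∧ x + y - t < n
  · rw [sum_pick (PySem.List.pyRange 0 n 1) (PySem.List.nodup_pyRange_one 0 n)
      (PySem.List.mem_pyRange_one.mpr ⟨hb.1, hb.2⟩) _ ?hz]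
    case hz =>
      intro x' _ hne
      refine if_neg (fun hc => hne ?_)
      have h2 := hc.2
      try dsimp only at h2
      omega
    rw [if_pos hb]
    have harith : x + y - t + t = x + y := by omega
    simp only [harith, ht1, ht2, and_true, true_and]
  · rw [List.sum_eq_zero ?hz0, if_neg ?hg0]
    case hg0 =>
      intro hc
      exact hb ⟨by omega, by omega⟩
    case hz0 =>
      intro a ha
      simp only [List.mem_map] at ha
      obtain ⟨x', hx', rfl⟩ := ha
      obtain ⟨hx'1, hx'2⟩ := PySem.List.mem_pyRange_one.mp hx'
      refine if_neg (fun hc => ?_)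
      have h2 := hc.2
      try dsimp only at h2
      omega

-- A's k ∈ range(2) loop with step dx*(-1)**k equals B's loop over ((dx,dy),(-dx,-dy))
lemma kfold_eq (board : List (List String)) (n : Int) (player : String)
    (x y dx dy count : Int) (moves : List (Int × Int × Int × Int)) :
    (PySem.List.pyRange 0 2 1).foldl (fun moves k =>
        let sx := dx * (-1 : Int) ^ k.toNat
        let sy := dy * (-1 : Int) ^ k.toNat
        let r := pvWalk board n player sx sy count (PySem.List.pyRange 0 count 1) x y
        if r.2.2 = false then moves ++ [(x, y, r.1, r.2.1)] else moves) moves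
      = [(dx, dy), (-dx, -dy)].foldl (fun moves s =>
        let r := pvWalk board n player s.1 s.2 count (PySem.List.pyRange 0 count 1) x y
        if r.2.2 = false then moves ++ [(x, y, r.1, r.2.1)] else moves) moves := by
  have h2 : PySem.List.pyRange 0 2 1 = [0, 1] := by decide
  simp only [h2, List.foldl_cons, List.foldl_nil]
  norm_num

-- ===== VERDICT (by name: the statement is the Claim_ definition above) =====
set_option maxHeartbeats 1000000 in
theorem valid_moves_spec : Claim_equal_valid_moves := by
  intro board player _hdom _hpre
  unfold Spec_valid_moves
  have hn : (0 : Int) ≤ (board.length : Int) := Int.natCast_nonneg _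
  simp only [valid_moves, valid_moves_alt]
  refine PySem.List.foldl_congr_mem _ _ _ _ ?_
  intro movesY y hyR
  refine PySem.List.foldl_congr_mem _ _ _ _ ?_
  intro movesX x hxR
  obtain ⟨hy1, hy2⟩ := PySem.List.mem_pyRange_one.mp hyR
  obtain ⟨hx1, hx2⟩ := PySem.List.mem_pyRange_one.mp hxR
  by_cases hcell : pvCell board y x = player
  · rw [if_pos hcell, if_pos hcell]
    simp only [List.foldl_cons, List.foldl_nil]
    rw [count_row board hn ⟨hx1, hx2⟩ ⟨hy1, hy2⟩, count_col board hn ⟨hx1, hx2⟩ ⟨hy1, hy2⟩,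
      count_diag board hn ⟨hx1, hx2⟩ ⟨hy1, hy2⟩, count_anti board hn ⟨hx1, hx2⟩ ⟨hy1, hy2⟩]
    simp only [kfold_eq]
    simp only [List.foldl_cons, List.foldl_nil]
  · rw [if_neg hcell, if_neg hcell]
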